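-- pv_equiv track=rewrite | github.com/Ankit-codes-ai/code-sentinel | src/flowchart-generator/logic-flowchart.py | truncate_mermaid_code
-- ===== SOURCE A (Python) =====
-- MAX_CONNECTIONS_PER_NODE = 10
--
-- def truncate_mermaid_code(mermaid_code, max_connections=MAX_CONNECTIONS_PER_NODE):
--     """Truncate mermaid code if it has too many connections"""
--     if not mermaid_code:
--         return ""
--
--     lines = mermaid_code.strip().splitlines()
--     connection_count = 0
--     truncated_lines = []
--
--     for line in lines:
--         if '-->' in line:
--             connection_count += 1
--             if connection_count > max_connections:
--                 truncated_lines.append("    %% ... (truncated for size)")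
--                 break
--         truncated_lines.append(line)
--
--     return '\n'.join(truncated_lines)
-- ===== SOURCE B (Python) =====
-- MAX_CONNECTIONS_PER_NODE = 10
--
-- def truncate_mermaid_code(mermaid_code, max_connections=MAX_CONNECTIONS_PER_NODE):
--     """Truncate mermaid code if it has too many connections (two-phase: index the connection lines, then slice)."""
--     if not mermaid_code:
--         return ""
--     lines = mermaid_code.strip().splitlines()
--     conn_indices = [i for i, line in enumerate(lines) if '-->' in line]
--     m = max(max_connections, 0)
--     if len(conn_indices) > m:
--         return '\n'.join(lines[:conn_indices[m]] + ["    %% ... (truncated for size)"])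
--     return '\n'.join(lines)
-- ===== Notes on version B (the rewrite author's own statement) =====
-- stated objective: simpler
-- what changed: A's single accumulate-and-break loop with a connection counter is replaced by a two-phase decomposition: first compute the list of indices of connection lines, then either slice the lines before the (max_connections+1)-th connection (clamping negative max_connections to 0) and append the truncation marker, or join everything unchanged.
import Mathlib
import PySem

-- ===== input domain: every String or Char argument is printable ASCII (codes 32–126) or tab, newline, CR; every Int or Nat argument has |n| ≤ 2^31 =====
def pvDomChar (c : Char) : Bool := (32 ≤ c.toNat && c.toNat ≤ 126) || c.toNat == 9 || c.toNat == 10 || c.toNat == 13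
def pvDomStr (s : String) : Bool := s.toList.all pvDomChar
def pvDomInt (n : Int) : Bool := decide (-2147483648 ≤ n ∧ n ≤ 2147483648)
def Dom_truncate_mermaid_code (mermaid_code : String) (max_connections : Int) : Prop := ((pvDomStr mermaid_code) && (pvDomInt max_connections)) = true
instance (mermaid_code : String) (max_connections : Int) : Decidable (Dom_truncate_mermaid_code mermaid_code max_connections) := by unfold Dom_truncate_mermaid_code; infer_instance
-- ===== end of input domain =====

-- B replaces A's accumulate-and-break loop by a two-phase decomposition (index the
-- connection lines once, then slice before the (max_connections+1)-th one); objective: simpler.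

-- ===== PORT A =====
-- the for-loop of A: state = (current line list, connection_count); break = stop recursing
def pvLoopA (maxc : Int) : List String → Int → List String
  | [], _ => []
  | line :: rest, cnt =>
    if PySem.Str.isIn "-->" line then
      if cnt + 1 > maxc then ["    %% ... (truncated for size)"]
      else line :: pvLoopA maxc rest (cnt + 1)
    else line :: pvLoopA maxc rest cnt

def truncate_mermaid_code (mermaid_code : String) (max_connections : Int) : String :=
  if mermaid_code = "" then ""
  else
    let lines := PySem.Str.splitlines (PySem.Str.strip mermaid_code)
    PySem.Str.join "\n" (pvLoopA max_connections lines 0)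

-- ===== PORT B =====
-- Python's enumerate(xs) starting at i
def pvEnumFrom {α : Type} (i : Nat) : List α → List (Nat × α)
  | [] => []
  | x :: xs => (i, x) :: pvEnumFrom (i + 1) xs

def truncate_mermaid_code_alt (mermaid_code : String) (max_connections : Int) : String :=
  if mermaid_code = "" then ""
  else
    let lines := PySem.Str.splitlines (PySem.Str.strip mermaid_code)
    let conn_indices : List Int := (pvEnumFrom 0 lines).filterMap
      (fun p => if PySem.Str.isIn "-->" p.2 then some ((p.1 : Int)) else none)
    let m := max max_connections 0
    if (conn_indices.length : Int) > m then
      -- conn_indices[m] is in range under the guard, so pyGet? is some; .getD 0 only unwraps it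
      PySem.Str.join "\n"
        (PySem.List.slice lines none (some ((PySem.List.pyGet? conn_indices m).getD 0))
          ++ ["    %% ... (truncated for size)"])
    else
      PySem.Str.join "\n" lines

-- ===== PRECONDITION & SPEC =====
def Spec_truncate_mermaid_code (mermaid_code : String) (max_connections : Int) (out : String) : Prop := out = truncate_mermaid_code_alt mermaid_code max_connections
instance (mermaid_code : String) (max_connections : Int) (out : String) : Decidable (Spec_truncate_mermaid_code mermaid_code max_connections out) := by unfold Spec_truncate_mermaid_code; infer_instance

-- ===== CLAIM (what is proved, stated in full; the proofs are below) =====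
def Claim_equal_truncate_mermaid_code : Prop := ∀ (mermaid_code : String) (max_connections : Int), Dom_truncate_mermaid_code mermaid_code max_connections → Spec_truncate_mermaid_code mermaid_code max_connections (truncate_mermaid_code mermaid_code max_connections)

-- ===== LEMMAS AND PROOFS =====

-- positions (0-based) of the lines containing "-->"
def pvCIdx : List String → List Nat
  | [] => []
  | l :: ls =>
    if PySem.Str.isIn "-->" l then 0 :: (pvCIdx ls).map (· + 1)
    else (pvCIdx ls).map (· + 1)

lemma pvEnumFrom_filterMap (ls : List String) : ∀ (i : Nat),
    (pvEnumFrom i ls).filterMap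
        (fun p => if PySem.Str.isIn "-->" p.2 then some ((p.1 : Int)) else none)
      = (pvCIdx ls).map (fun n => ((i + n : Nat) : Int)) := by
  induction ls with
  | nil => intro i; simp [pvEnumFrom, pvCIdx]
  | cons l ls ih =>
    intro i
    rw [show pvEnumFrom i (l :: ls) = (i, l) :: pvEnumFrom (i + 1) ls from rfl,
        List.filterMap_cons, ih (i + 1)]
    by_cases h : PySem.Str.isIn "-->" l
    · rw [if_pos h, show pvCIdx (l :: ls) = 0 :: (pvCIdx ls).map (· + 1) from by
        rw [pvCIdx, if_pos h]]
      simp only [List.map_cons, List.map_map, Function.comp_def, Nat.cast_add,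
        Nat.cast_one, Nat.cast_zero]
      refine congrArg₂ _ (by ring) ?_
      apply List.map_congr_left
      intro n _
      ring
    · rw [if_neg h, show pvCIdx (l :: ls) = (pvCIdx ls).map (· + 1) from by
        rw [pvCIdx, if_neg h]]
      simp only [List.map_map, Function.comp_def]
      apply List.map_congr_left
      intro n _
      push_cast
      ring

lemma pvLoopA_eq (maxc : Int) (ls : List String) : ∀ (cnt : Int),
    pvLoopA maxc ls cnt =
      if (maxc - cnt).toNat < (pvCIdx ls).length
      then ls.take (((pvCIdx ls)[(maxc - cnt).toNat]?).getD 0)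
             ++ ["    %% ... (truncated for size)"]
      else ls := by
  induction ls with
  | nil => intro cnt; simp [pvLoopA, pvCIdx]
  | cons l ls ih =>
    intro cnt
    by_cases h : PySem.Str.isIn "-->" l
    · have h' : PySem.Chars.isIn ['-', '-', '>'] l.toList = true := by simpa using h
      by_cases hb : cnt + 1 > maxc
      · have hk : (maxc - cnt).toNat = 0 := by omega
        simp [pvLoopA, pvCIdx, h', hb, hk]
      · have hk : (maxc - cnt).toNat = (maxc - (cnt + 1)).toNat + 1 := by omega
        by_cases hc : (maxc - (cnt + 1)).toNat < (pvCIdx ls).length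
        · have he : (pvCIdx ls)[(maxc - (cnt + 1)).toNat]?
              = some ((pvCIdx ls)[(maxc - (cnt + 1)).toNat]'hc) :=
            List.getElem?_eq_getElem hc
          simp [pvLoopA, pvCIdx, h', hb, hk, hc, ih, List.take_succ_cons]
        · simp [pvLoopA, pvCIdx, h', hb, hk, hc, ih]
    · have h' : PySem.Chars.isIn ['-', '-', '>'] l.toList = false := by simpa using h
      by_cases hc : (maxc - cnt).toNat < (pvCIdx ls).length
      · have he : (pvCIdx ls)[(maxc - cnt).toNat]?
            = some ((pvCIdx ls)[(maxc - cnt).toNat]'hc) :=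
          List.getElem?_eq_getElem hc
        simp [pvLoopA, pvCIdx, h', hc, ih, List.take_succ_cons]
      · simp [pvLoopA, pvCIdx, h', hc, ih]

lemma pvMain (L : List String) (maxc : Int) :
    PySem.Str.join "\n" (pvLoopA maxc L 0) =
      (if (((((pvEnumFrom 0 L).filterMap
            (fun p => if PySem.Str.isIn "-->" p.2 then some ((p.1 : Int)) else none)).length : Nat) : Int)
          > max maxc 0) then
        PySem.Str.join "\n"
          (PySem.List.slice L none
              (some ((PySem.List.pyGet?
                ((pvEnumFrom 0 L).filterMap
                  (fun p => if PySem.Str.isIn "-->" p.2 then some ((p.1 : Int)) else none))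
                (max maxc 0)).getD 0))
            ++ ["    %% ... (truncated for size)"])
      else PySem.Str.join "\n" L) := by
  rw [pvEnumFrom_filterMap, pvLoopA_eq]
  have hm : max maxc 0 = ((maxc.toNat : Nat) : Int) := by omega
  have h0 : (maxc - 0).toNat = maxc.toNat := by omega
  by_cases hc : (maxc - 0).toNat < (pvCIdx L).length
  · rw [if_pos hc, if_pos (by simp only [List.length_map]; omega)]
    have he : (pvCIdx L)[maxc.toNat]? = some ((pvCIdx L)[maxc.toNat]'(by omega)) :=
      List.getElem?_eq_getElem (by omega)
    rw [hm, PySem.List.pyGet?_natCast]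
    simp only [List.getElem?_map, he, Option.map_some, Option.getD_some]
    rw [PySem.List.slice_to L (by positivity)]
    simp [he]
  · rw [if_neg hc, if_neg (by simp only [List.length_map]; omega)]

-- ===== VERDICT (by name: the statement is the Claim_ definition above) =====
theorem truncate_mermaid_code_spec : Claim_equal_truncate_mermaid_code := by
  intro s maxc _
  unfold Spec_truncate_mermaid_code truncate_mermaid_code truncate_mermaid_code_alt
  by_cases hs : s = ""
  · simp [hs]
  · rw [if_neg hs, if_neg hs]
    exact pvMain (PySem.Str.splitlines (PySem.Str.strip s)) maxc
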